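-- pv_equiv track=rewrite | github.com/runzedong/AdventOfCode2019 | day6/day6-p1.py | calculate_node_orbit
-- ===== SOURCE A (Python) =====
-- def calculate_node_orbit(graph, orbit_map, node):
--     if node in orbit_map:
--         return orbit_map[node]
--     if node not in graph:
--         return 0
--     total_orbit = 0
--     for next_node in graph[node]:
--         total_orbit += 1 + calculate_node_orbit(graph, orbit_map, next_node)
--     return total_orbit
-- ===== SOURCE B (Python) =====
-- def calculate_node_orbit(graph, orbit_map, node):
--     memo = dict(orbit_map)
--
--     def go(u):
--         if u in memo:
--             return memo[u]
--         total = 0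
--         for v in graph.get(u, []):
--             total += 1 + go(v)
--         memo[u] = total
--         return total
--
--     return go(node)
-- ===== Notes on version B (the rewrite author's own statement) =====
-- stated objective: alternative
-- what changed: B replaces A's naive recursion (which never writes to the orbit_map cache it is handed) with a memoized depth-first traversal: it copies orbit_map into a local cache and stores every computed count, so each node is evaluated at most once instead of once per path.
-- outside the precondition, e.g. on calculate_node_orbit({'X': ['X']}, {}, 'A'): A returns 0, B returns 0
import Mathlib
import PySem

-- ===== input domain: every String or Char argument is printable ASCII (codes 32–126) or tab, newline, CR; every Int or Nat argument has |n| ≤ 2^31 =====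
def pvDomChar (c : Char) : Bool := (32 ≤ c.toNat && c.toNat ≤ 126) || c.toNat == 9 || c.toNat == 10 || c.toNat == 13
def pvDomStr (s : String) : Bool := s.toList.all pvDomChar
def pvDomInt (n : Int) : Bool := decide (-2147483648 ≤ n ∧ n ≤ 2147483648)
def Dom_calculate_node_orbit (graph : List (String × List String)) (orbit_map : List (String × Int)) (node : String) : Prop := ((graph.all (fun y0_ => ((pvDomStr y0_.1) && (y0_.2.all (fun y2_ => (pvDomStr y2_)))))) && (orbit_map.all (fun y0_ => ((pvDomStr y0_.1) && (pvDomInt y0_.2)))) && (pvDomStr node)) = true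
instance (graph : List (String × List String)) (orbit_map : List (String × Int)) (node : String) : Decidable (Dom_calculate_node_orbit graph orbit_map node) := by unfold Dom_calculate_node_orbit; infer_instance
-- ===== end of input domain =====

-- B memoizes: it copies orbit_map into a local cache and records every computed orbit count, so
-- each node is evaluated at most once instead of once per path (objective: alternative algorithm;
-- same return value, neither version mutates its arguments).


-- ===== PORT A =====
-- A's recursion has no termination argument in Lean (Python raises RecursionError on orbit
-- cycles), so the port carries a fuel counter; under Pre_ (acyclic orbit graph) the fuel
-- graph.length + 1 is proved never to run out, so the port computes exactly what A computes.
def calculate_node_orbit_fuel (graph : List (String × List String)) (orbit_map : List (String × Int)) : Nat → String → Int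
  | 0, _ => 0
  | fuel+1, node =>
    match (PySem.Dict.mk orbit_map).get? node with
    | some v => v
    | none =>
      match (PySem.Dict.mk graph).get? node with
      | none => 0
      | some children => children.foldl (fun total v => total + (1 + calculate_node_orbit_fuel graph orbit_map fuel v)) 0

def calculate_node_orbit (graph : List (String × List String)) (orbit_map : List (String × Int)) (node : String) : Int :=
  calculate_node_orbit_fuel graph orbit_map (graph.length + 1) node

-- ===== PORT B =====
-- transliteration of Source B's inner 'go' (the memo dict is threaded through; same fuel device)
mutual
def pvGo (graph : List (String × List String)) (fuel : Nat) (memo : PySem.Dict String Int) (u : String) : Int × PySem.Dict String Int :=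
  match fuel with
  | 0 => (0, memo)
  | fuel'+1 =>
    match memo.get? u with
    | some v => (v, memo)
    | none =>
      let r := pvGoChildren graph fuel' 0 memo (((PySem.Dict.mk graph).get? u).getD [])
      (r.1, r.2.insert u r.1)
termination_by (fuel, 0)

-- the 'for v in graph.get(u, [])' loop: total accumulates left to right, memo is threaded
def pvGoChildren (graph : List (String × List String)) (fuel : Nat) (total : Int) (memo : PySem.Dict String Int) (vs : List String) : Int × PySem.Dict String Int :=
  match vs with
  | [] => (total, memo)
  | v :: rest =>
    let r := pvGo graph fuel memo v
    pvGoChildren graph fuel (total + (1 + r.1)) r.2 rest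
termination_by (fuel, vs.length + 1)
end

def calculate_node_orbit_alt (graph : List (String × List String)) (orbit_map : List (String × Int)) (node : String) : Int :=
  (pvGo graph (graph.length + 1) (PySem.Dict.mk orbit_map) node).1

-- ===== PRECONDITION & SPEC =====
-- the orbit edges A's recursion actually follows: none from nodes answered by orbit_map
def pvSucc (graph : List (String × List String)) (orbit_map : List (String × Int)) (u : String) : List String :=
  if ((PySem.Dict.mk orbit_map).get? u).isSome then []
  else ((PySem.Dict.mk graph).get? u).getD []

def pvActive (graph : List (String × List String)) (orbit_map : List (String × Int)) : List String :=
  (graph.map Prod.fst).filter (fun u => ((PySem.Dict.mk orbit_map).get? u).isNone)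

def pvStep (graph : List (String × List String)) (orbit_map : List (String × Int)) (R : List String) : List String :=
  R.filter (fun u => (pvSucc graph orbit_map u).any (fun v => R.contains v))

def pvIter (graph : List (String × List String)) (orbit_map : List (String × Int)) : Nat → List String
  | 0 => pvActive graph orbit_map
  | k+1 => pvStep graph orbit_map (pvIter graph orbit_map k)

-- Pre_ is the closed-form statement that the orbit graph (restricted to keys not answered by
-- orbit_map) is ACYCLIC, in its standard finite-graph form: repeatedly deleting vertices with no
-- remaining successor deletes every vertex. It speaks only about the input's edge structure —
-- neither port peels vertices, and no orbit count or port state appears — and bounds no sizes.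
-- On cyclic graphs reachable from node Python A raises RecursionError (and Python B too); Pre_ is
-- global, so it also excludes graphs whose only cycles are unreachable from node, where both
-- programs return the same value (cited in claim.json).
def Pre_calculate_node_orbit (graph : List (String × List String)) (orbit_map : List (String × Int)) (node : String) : Prop :=
  pvIter graph orbit_map graph.length = []
instance (graph : List (String × List String)) (orbit_map : List (String × Int)) (node : String) : Decidable (Pre_calculate_node_orbit graph orbit_map node) := by unfold Pre_calculate_node_orbit; infer_instance

def pvWitness_calculate_node_orbit : (List (String × List String)) × (List (String × Int)) × String :=
  ([("A", ["B", "C"]), ("B", ["C"])], [("C", 2)], "A")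

def Spec_calculate_node_orbit (graph : List (String × List String)) (orbit_map : List (String × Int)) (node : String) (out : Int) : Prop := out = calculate_node_orbit_alt graph orbit_map node
instance (graph : List (String × List String)) (orbit_map : List (String × Int)) (node : String) (out : Int) : Decidable (Spec_calculate_node_orbit graph orbit_map node out) := by unfold Spec_calculate_node_orbit; infer_instance

-- ===== CLAIM (what is proved, stated in full; the proofs are below) =====
def Claim_equal_calculate_node_orbit : Prop := ∀ (graph : List (String × List String)) (orbit_map : List (String × Int)) (node : String), Dom_calculate_node_orbit graph orbit_map node → Pre_calculate_node_orbit graph orbit_map node → Spec_calculate_node_orbit graph orbit_map node (calculate_node_orbit graph orbit_map node)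

-- ===== LEMMAS AND PROOFS =====

theorem pv_witness_ok : Dom_calculate_node_orbit pvWitness_calculate_node_orbit.1 pvWitness_calculate_node_orbit.2.1 pvWitness_calculate_node_orbit.2.2 ∧ Pre_calculate_node_orbit pvWitness_calculate_node_orbit.1 pvWitness_calculate_node_orbit.2.1 pvWitness_calculate_node_orbit.2.2 := by
  constructor <;> decide

-- a key kept at stage k but dropped at stage k+1 has all its children outside stage k
theorem pv_chain_out (graph : List (String × List String)) (orbit_map : List (String × Int)) (k : Nat) (u : String) (hin : u ∈ pvIter graph orbit_map k) (hout : u ∉ pvIter graph orbit_map (k+1)) : ∀ v ∈ pvSucc graph orbit_map u, v ∉ pvIter graph orbit_map k := by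
  intro v hv hvk
  apply hout
  simp only [pvIter, pvStep, List.mem_filter, hin, true_and]
  simp only [List.any_eq_true]
  exact ⟨v, hv, by simpa using hvk⟩

-- elements of every stage are active keys
theorem pv_mem_active (graph : List (String × List String)) (orbit_map : List (String × Int)) (k : Nat) (u : String) (h : u ∈ pvIter graph orbit_map k) : u ∈ pvActive graph orbit_map := by
  induction k with
  | zero => exact h
  | succ k ih => exact ih (List.mem_of_mem_filter h)

-- an active key: in graph's keys, not in orbit_map
theorem pv_active_iff (graph : List (String × List String)) (orbit_map : List (String × Int)) (u : String) : u ∈ pvActive graph orbit_map ↔ u ∈ graph.map Prod.fst ∧ ((PySem.Dict.mk orbit_map).get? u).isNone := by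
  simp [pvActive, List.mem_filter]

-- a non-active node evaluates without recursion: not a graph key (given no orbit hit)
theorem pv_graph_none (graph : List (String × List String)) (orbit_map : List (String × Int)) (u : String) (hna : u ∉ pvActive graph orbit_map) (hO : (PySem.Dict.mk orbit_map).get? u = none) : (PySem.Dict.mk graph).get? u = none := by
  rw [PySem.Dict.get?_eq_none_iff_not_mem_keys]
  intro hk
  exact hna ((pv_active_iff graph orbit_map u).2 ⟨by simpa using hk, by simp [hO]⟩)

-- an active node is a graph key: it has a children list
theorem pv_graph_some (graph : List (String × List String)) (orbit_map : List (String × Int)) (u : String) (ha : u ∈ pvActive graph orbit_map) : ∃ cs, (PySem.Dict.mk graph).get? u = some cs ∧ pvSucc graph orbit_map u = cs := by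
  obtain ⟨hk, hO⟩ := (pv_active_iff graph orbit_map u).1 ha
  cases hcs : (PySem.Dict.mk graph).get? u with
  | none =>
    have := (PySem.Dict.get?_eq_none_iff_not_mem_keys _ _).1 hcs
    exact absurd hk (by simpa using this)
  | some cs => exact ⟨cs, rfl, by simp [pvSucc, hcs, Option.isNone_iff_eq_none.1 hO]⟩

-- A's fueled recursion gives the same value for any two fuels above the peeling stage at which u is dropped
theorem pv_stable (graph : List (String × List String)) (orbit_map : List (String × Int)) : ∀ (k : Nat) (u : String) (f₁ f₂ : Nat), u ∉ pvIter graph orbit_map k → k + 1 ≤ f₁ → k + 1 ≤ f₂ → calculate_node_orbit_fuel graph orbit_map f₁ u = calculate_node_orbit_fuel graph orbit_map f₂ u := by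
  intro k
  induction k with
  | zero =>
    intro u f₁ f₂ hu h1 h2
    match f₁, f₂ with
    | a+1, b+1 =>
      simp only [calculate_node_orbit_fuel]
      cases hO : (PySem.Dict.mk orbit_map).get? u with
      | some v => rfl
      | none => rw [pv_graph_none graph orbit_map u hu hO]
  | succ k ih =>
    intro u f₁ f₂ hu h1 h2
    by_cases hk : u ∈ pvIter graph orbit_map k
    case neg => exact ih u f₁ f₂ hk (by omega) (by omega)
    case pos =>
      have ha : u ∈ pvActive graph orbit_map := pv_mem_active graph orbit_map k u hk
      obtain ⟨hkeys, hO⟩ := (pv_active_iff graph orbit_map u).1 ha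
      obtain ⟨cs, hcs, hsucc⟩ := pv_graph_some graph orbit_map u ha
      have hchild : ∀ v ∈ cs, v ∉ pvIter graph orbit_map k := by
        intro v hv
        exact pv_chain_out graph orbit_map k u hk hu v (hsucc ▸ hv)
      match f₁, f₂ with
      | a+1, b+1 =>
        simp only [calculate_node_orbit_fuel, Option.isNone_iff_eq_none.1 hO, hcs]
        apply PySem.List.foldl_congr_mem
        intro acc v hv
        rw [ih v a b (hchild v hv) (by omega) (by omega)]

-- proof-side abbreviations: the common value both ports compute, and the memo invariant
def pvF (graph : List (String × List String)) (orbit_map : List (String × Int)) (u : String) : Int :=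
  calculate_node_orbit_fuel graph orbit_map (graph.length + 1) u

def pvInv (graph : List (String × List String)) (orbit_map : List (String × Int)) (memo : PySem.Dict String Int) : Prop :=
  (∀ w x, memo.get? w = some x → x = pvF graph orbit_map w) ∧
  (∀ w x, (PySem.Dict.mk orbit_map).get? w = some x → memo.get? w = some x)

-- inserting a correct value preserves the memo invariant
theorem pv_inv_insert (graph : List (String × List String)) (orbit_map : List (String × Int)) (memo : PySem.Dict String Int) (u : String) (t : Int) (hinv : pvInv graph orbit_map memo) (hO : (PySem.Dict.mk orbit_map).get? u = none) (ht : t = pvF graph orbit_map u) : pvInv graph orbit_map (memo.insert u t) := by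
  constructor
  · intro w x hx
    rw [PySem.Dict.get?_insert] at hx
    split at hx
    · cases hx; subst ht; rename_i h; rw [h]
    · exact hinv.1 w x hx
  · intro w x hx
    rw [PySem.Dict.get?_insert]
    split
    · rename_i h; rw [h] at hx; rw [hx] at hO; cases hO
    · exact hinv.2 w x hx

-- the children loop of B: accumulates A's per-child values left to right, memo stays invariant
theorem pv_goChildrenF (graph : List (String × List String)) (orbit_map : List (String × Int)) (k : Nat)
    (IH : ∀ (u : String) (f : Nat) (memo : PySem.Dict String Int), u ∉ pvIter graph orbit_map k → k + 1 ≤ f → pvInv graph orbit_map memo → (pvGo graph f memo u).1 = pvF graph orbit_map u ∧ pvInv graph orbit_map (pvGo graph f memo u).2) :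
    ∀ (vs : List String), (∀ v ∈ vs, v ∉ pvIter graph orbit_map k) → ∀ (f : Nat), k + 1 ≤ f → ∀ (total : Int) (memo : PySem.Dict String Int), pvInv graph orbit_map memo →
    (pvGoChildren graph f total memo vs).1 = vs.foldl (fun acc v => acc + (1 + pvF graph orbit_map v)) total ∧ pvInv graph orbit_map (pvGoChildren graph f total memo vs).2 := by
  intro vs
  induction vs with
  | nil => intro _ f hf total memo hinv; simpa [pvGoChildren] using hinv
  | cons v rest ih =>
    intro hvs f hf total memo hinv
    obtain ⟨h1, h2⟩ := IH v f memo (hvs v (by simp)) hf hinv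
    simpa [pvGoChildren, h1] using
      ih (fun w hw => hvs w (by simp [hw])) f hf (total + (1 + pvF graph orbit_map v)) (pvGo graph f memo v).2 h2

-- main lemma for B: with a correct memo and enough fuel, go returns A's value and keeps the memo correct
theorem pv_goF (graph : List (String × List String)) (orbit_map : List (String × Int)) : ∀ (k : Nat), k ≤ graph.length → ∀ (u : String) (f : Nat) (memo : PySem.Dict String Int), u ∉ pvIter graph orbit_map k → k + 1 ≤ f → pvInv graph orbit_map memo → (pvGo graph f memo u).1 = pvF graph orbit_map u ∧ pvInv graph orbit_map (pvGo graph f memo u).2 := by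
  intro k
  induction k with
  | zero =>
    intro _ u f memo hu hf hinv
    match f, hf with
    | a+1, _ =>
      simp only [pvGo]
      cases hm : memo.get? u with
      | some v => exact ⟨hinv.1 u v hm, hinv⟩
      | none =>
        have hO : (PySem.Dict.mk orbit_map).get? u = none := by
          cases h : (PySem.Dict.mk orbit_map).get? u with
          | none => rfl
          | some x => rw [hinv.2 u x h] at hm; cases hm
        have hG := pv_graph_none graph orbit_map u hu hO
        have hFu : pvF graph orbit_map u = 0 := by
          simp [pvF, calculate_node_orbit_fuel, hO, hG]
        exact ⟨by simp [hG, pvGoChildren, hFu], by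
          simpa [hG, pvGoChildren] using pv_inv_insert graph orbit_map memo u 0 hinv hO hFu.symm⟩
  | succ k ih =>
    intro hkn u f memo hu hf hinv
    by_cases hk : u ∈ pvIter graph orbit_map k
    case neg => exact ih (by omega) u f memo hk (by omega) hinv
    case pos =>
      match f, hf with
      | a+1, _ =>
        simp only [pvGo]
        cases hm : memo.get? u with
        | some v => exact ⟨hinv.1 u v hm, hinv⟩
        | none =>
          have hO : (PySem.Dict.mk orbit_map).get? u = none := by
            cases h : (PySem.Dict.mk orbit_map).get? u with
            | none => rfl
            | some x => rw [hinv.2 u x h] at hm; cases hm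
          have ha : u ∈ pvActive graph orbit_map := pv_mem_active graph orbit_map k u hk
          obtain ⟨cs, hcs, hsucc⟩ := pv_graph_some graph orbit_map u ha
          have hchild : ∀ v ∈ cs, v ∉ pvIter graph orbit_map k := fun v hv =>
            pv_chain_out graph orbit_map k u hk hu v (hsucc ▸ hv)
          obtain ⟨hc1, hc2⟩ := pv_goChildrenF graph orbit_map k (ih (by omega)) cs hchild a (by omega) 0 memo hinv
          have hFu : pvF graph orbit_map u = cs.foldl (fun acc v => acc + (1 + pvF graph orbit_map v)) 0 := by
            have h1 : pvF graph orbit_map u = cs.foldl (fun t v => t + (1 + calculate_node_orbit_fuel graph orbit_map graph.length v)) 0 := by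
              conv_lhs => rw [pvF, calculate_node_orbit_fuel]
              rw [hO, hcs]
            rw [h1]
            apply PySem.List.foldl_congr_mem
            intro acc v hv
            rw [pv_stable graph orbit_map k v graph.length (graph.length + 1) (hchild v hv) (by omega) (by omega)]
            rfl
          refine ⟨by simp [hcs, hc1, hFu], ?_⟩
          simpa [hcs] using pv_inv_insert graph orbit_map (pvGoChildren graph a 0 memo cs).2 u (pvGoChildren graph a 0 memo cs).1 hc2 hO (by rw [hc1, hFu])

-- the initial memo (a copy of orbit_map) satisfies the invariant
theorem pv_inv_init (graph : List (String × List String)) (orbit_map : List (String × Int)) : pvInv graph orbit_map (PySem.Dict.mk orbit_map) := by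
  refine ⟨fun w x hx => ?_, fun w x hx => hx⟩
  simp [pvF, calculate_node_orbit_fuel, hx]

theorem calculate_node_orbit_spec : Claim_equal_calculate_node_orbit := by
  intro graph orbit_map node _hdom hpre
  unfold Pre_calculate_node_orbit at hpre
  unfold Spec_calculate_node_orbit calculate_node_orbit calculate_node_orbit_alt
  have hnm : node ∉ pvIter graph orbit_map graph.length := by rw [hpre]; simp
  exact (pv_goF graph orbit_map graph.length (le_refl _) node (graph.length + 1) (PySem.Dict.mk orbit_map) hnm (le_refl _) (pv_inv_init graph orbit_map)).1.symm
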